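-- pv_equiv track=rewrite | github.com/ranjanlamsal/mindpulse | chatbot/services.py | _detect_crisis_indicators
-- ===== SOURCE A (Python) =====
-- from typing import Dict, List, Any, Optional, Tuple
--
-- def _detect_crisis_indicators(content: str) -> Tuple[str, List[str]]:
--     """
--     Detect crisis indicators in user message.
--     """
--     crisis_keywords = {
--         'critical': ['suicide', 'kill myself', 'end it all', 'not worth living', 'want to die'],
--         'high': ['can\'t go on', 'overwhelming', 'breaking point', 'can\'t handle', 'give up'],
--         'moderate': ['very stressed', 'anxious', 'depressed', 'struggling', 'difficult time'],
--         'low': ['worried', 'concerned', 'stressed', 'tired', 'overwhelmed']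
--     }
--
--     content_lower = content.lower()
--     detected_indicators = []
--     crisis_level = 'none'
--
--     for level, keywords in crisis_keywords.items():
--         for keyword in keywords:
--             if keyword in content_lower:
--                 detected_indicators.append(keyword)
--                 if level == 'critical':
--                     crisis_level = 'critical'
--                 elif level == 'high' and crisis_level != 'critical':
--                     crisis_level = 'high'
--                 elif level == 'moderate' and crisis_level not in ['critical', 'high']:
--                     crisis_level = 'moderate'
--                 elif level == 'low' and crisis_level == 'none':
--                     crisis_level = 'low'
--
--     return crisis_level, detected_indicators
-- ===== SOURCE B (Python) =====
-- def _detect_crisis_indicators(content):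
--     crisis_keywords = {
--         'critical': ['suicide', 'kill myself', 'end it all', 'not worth living', 'want to die'],
--         'high': ['can\'t go on', 'overwhelming', 'breaking point', 'can\'t handle', 'give up'],
--         'moderate': ['very stressed', 'anxious', 'depressed', 'struggling', 'difficult time'],
--         'low': ['worried', 'concerned', 'stressed', 'tired', 'overwhelmed']
--     }
--     order = ['critical', 'high', 'moderate', 'low']
--     content_lower = content.lower()
--     detected_indicators = [kw for level in order
--                            for kw in crisis_keywords[level]
--                            if kw in content_lower]
--     crisis_level = next((level for level in order
--                          if any(kw in content_lower for kw in crisis_keywords[level])),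
--                         'none')
--     return crisis_level, detected_indicators
-- ===== Notes on version B (the rewrite author's own statement) =====
-- stated objective: simpler
-- what changed: Replaces the stateful elif ladder that mutates crisis_level inside the keyword loop with a flat comprehension collecting matched keywords plus an independent priority scan that picks the first severity level with any match.
import Mathlib
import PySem

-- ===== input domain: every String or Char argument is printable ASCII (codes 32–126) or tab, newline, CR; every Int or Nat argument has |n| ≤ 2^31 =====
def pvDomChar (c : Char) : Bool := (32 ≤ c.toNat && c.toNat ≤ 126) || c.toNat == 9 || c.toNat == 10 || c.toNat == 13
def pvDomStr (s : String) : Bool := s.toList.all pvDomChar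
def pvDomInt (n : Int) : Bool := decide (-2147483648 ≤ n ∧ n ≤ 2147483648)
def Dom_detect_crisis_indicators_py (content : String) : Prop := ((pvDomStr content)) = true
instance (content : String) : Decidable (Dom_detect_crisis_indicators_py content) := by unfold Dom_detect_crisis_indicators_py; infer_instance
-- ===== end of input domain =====

-- B restructures A: a flat filter builds detected_indicators, and the crisis level is found by an
-- independent priority scan (first level with any match) instead of A's stateful elif ladder.

-- ===== PORT A =====
-- the dict literal crisis_keywords, in insertion order
def crisisKeywordsA : List (String × List String) :=
  [("critical", ["suicide", "kill myself", "end it all", "not worth living", "want to die"]),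
   ("high", ["can't go on", "overwhelming", "breaking point", "can't handle", "give up"]),
   ("moderate", ["very stressed", "anxious", "depressed", "struggling", "difficult time"]),
   ("low", ["worried", "concerned", "stressed", "tired", "overwhelmed"])]

-- the elif ladder updating crisis_level (body of the 'if keyword in content_lower' branch)
def updLevelA (level crisis_level : String) : String :=
  if level = "critical" then "critical"
  else if level = "high" ∧ crisis_level ≠ "critical" then "high"
  else if level = "moderate" ∧ crisis_level ∉ ["critical", "high"] then "moderate"
  else if level = "low" ∧ crisis_level = "none" then "low"
  else crisis_level

def detect_crisis_indicators_py (content : String) : String × List String :=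
  let content_lower := PySem.Str.lower content
  let st :=
    crisisKeywordsA.foldl (fun st lk =>
      lk.2.foldl (fun st keyword =>
        if PySem.Str.isIn keyword content_lower then
          (updLevelA lk.1 st.1, st.2 ++ [keyword])
        else st) st) ("none", [])
  (st.1, st.2)

-- ===== PORT B =====
def crisisBucketsB : List (String × List String) :=
  [("critical", ["suicide", "kill myself", "end it all", "not worth living", "want to die"]),
   ("high", ["can't go on", "overwhelming", "breaking point", "can't handle", "give up"]),
   ("moderate", ["very stressed", "anxious", "depressed", "struggling", "difficult time"]),
   ("low", ["worried", "concerned", "stressed", "tired", "overwhelmed"])]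

def detect_crisis_indicators_py_alt (content : String) : String × List String :=
  let content_lower := PySem.Str.lower content
  let detected := crisisBucketsB.flatMap (fun lk => lk.2.filter (fun kw => PySem.Str.isIn kw content_lower))
  let level :=
    match crisisBucketsB.find? (fun lk => lk.2.any (fun kw => PySem.Str.isIn kw content_lower)) with
    | some lk => lk.1
    | none => "none"
  (level, detected)

-- ===== PRECONDITION & SPEC =====
def Spec_detect_crisis_indicators_py (content : String) (out : String × List String) : Prop := out = detect_crisis_indicators_py_alt content
instance (content : String) (out : String × List String) : Decidable (Spec_detect_crisis_indicators_py content out) := by unfold Spec_detect_crisis_indicators_py; infer_instance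

-- ===== CLAIM (what is proved, stated in full; the proofs are below) =====
def Claim_equal_detect_crisis_indicators_py : Prop := ∀ (content : String), Dom_detect_crisis_indicators_py content → Spec_detect_crisis_indicators_py content (detect_crisis_indicators_py content)

-- ===== LEMMAS AND PROOFS =====

-- A's level update is idempotent, so applying it once per matched keyword of a bucket
-- is the same as applying it once if the bucket has any match.
lemma updLevelA_idem (name l : String) : updLevelA name (updLevelA name l) = updLevelA name l := by
  unfold updLevelA
  split_ifs <;> simp_all

-- A's inner loop over one bucket, characterised: the level is updated once iff any keyword
-- matches, and the matched keywords of the bucket are appended in order.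
lemma innerA (name low : String) (kws : List String) (st : String × List String) :
    kws.foldl (fun st keyword =>
        if PySem.Str.isIn keyword low then
          (updLevelA name st.1, st.2 ++ [keyword])
        else st) st
      = ((if kws.any (fun kw => PySem.Str.isIn kw low) then updLevelA name st.1 else st.1),
         st.2 ++ kws.filter (fun kw => PySem.Str.isIn kw low)) := by
  induction kws generalizing st with
  | nil => simp
  | cons k t ih =>
    cases hk : PySem.Str.isIn k low with
    | true =>
      simp only [List.foldl_cons, List.any_cons, List.filter_cons, hk, Bool.true_or, if_pos]
      rw [ih]
      cases ht : (t.any fun kw => PySem.Str.isIn kw low) <;>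
        simp [updLevelA_idem]
    | false =>
      simp only [List.foldl_cons, List.any_cons, List.filter_cons, hk, Bool.false_or]
      rw [ih]
      simp

theorem detect_crisis_indicators_py_spec' (content : String) :
    detect_crisis_indicators_py content = detect_crisis_indicators_py_alt content := by
  unfold detect_crisis_indicators_py detect_crisis_indicators_py_alt crisisKeywordsA crisisBucketsB
  simp only [List.foldl_cons, List.foldl_nil, innerA, List.flatMap_cons, List.flatMap_nil,
    List.find?_cons, List.append_nil, List.nil_append, List.append_assoc]
  cases hc : (["suicide", "kill myself", "end it all", "not worth living", "want to die"].any
      (fun kw => PySem.Str.isIn kw (PySem.Str.lower content))) <;>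
  cases hh : (["can't go on", "overwhelming", "breaking point", "can't handle", "give up"].any
      (fun kw => PySem.Str.isIn kw (PySem.Str.lower content))) <;>
  cases hm : (["very stressed", "anxious", "depressed", "struggling", "difficult time"].any
      (fun kw => PySem.Str.isIn kw (PySem.Str.lower content))) <;>
  cases hl : (["worried", "concerned", "stressed", "tired", "overwhelmed"].any
      (fun kw => PySem.Str.isIn kw (PySem.Str.lower content))) <;>
  simp [updLevelA]

-- ===== VERDICT (by name: the statement is the Claim_ definition above) =====
theorem detect_crisis_indicators_py_spec : Claim_equal_detect_crisis_indicators_py := by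
  intro content _
  exact detect_crisis_indicators_py_spec' content
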